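-- pv_equiv track=rewrite | github.com/pressk2start/JJINJJINJJJIN-E-YA | bot/ignition_checks.py | check_consecutive_buys
-- ===== SOURCE A (Python) =====
-- from typing import Tuple, List, Dict, Any, Optional
--
-- def check_consecutive_buys(
--     ticks: List[Dict],
--     window_sec: int,
--     ign_consec_buy_min: int
-- ) -> Tuple[bool, int]:
--     """연속 매수 조건 체크 (조건 2)
--
--     지정된 시간 내 연속 매수 횟수가 임계치 이상인지 확인
--
--     Args:
--         ticks: 틱 데이터 리스트 (시간순 정렬)
--         window_sec: 윈도우 크기 (초)
--         ign_consec_buy_min: 최소 연속 매수 횟수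
--
--     Returns:
--         (is_consec, max_streak): 조건 충족 여부와 최대 연속 횟수
--     """
--     if not ticks or len(ticks) < 3:
--         return False, 0
--
--     max_streak = 0
--     current_streak = 0
--
--     for t in ticks:
--         ask_bid = t.get("ask_bid", "").upper()
--         if ask_bid == "BID":  # 매수
--             current_streak += 1
--             max_streak = max(max_streak, current_streak)
--         else:
--             current_streak = 0
--
--     is_consec = max_streak >= ign_consec_buy_min
--     return is_consec, max_streak
-- ===== SOURCE B (Python) =====
-- def check_consecutive_buys(ticks, window_sec, ign_consec_buy_min):
--     """Run-grouping re-implementation: materialise the BID/non-BID flags,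
--     split them into maximal equal runs with a two-pointer scan, and take
--     the longest BID run (0 when there is none)."""
--     if not ticks or len(ticks) < 3:
--         return False, 0
--     bids = [t.get("ask_bid", "").upper() == "BID" for t in ticks]
--     runs = []
--     i = 0
--     n = len(bids)
--     while i < n:
--         j = i
--         while j < n and bids[j] == bids[i]:
--             j += 1
--         if bids[i]:
--             runs.append(j - i)
--         i = j
--     max_streak = max(runs, default=0)
--     return max_streak >= ign_consec_buy_min, max_streak
-- ===== Notes on version B (the rewrite author's own statement) =====
-- stated objective: alternative
-- what changed: Replaces A's running max/current counters with an explicit run-grouping pass: the BID flags are materialised once, split into maximal equal runs by a two-pointer scan, and the answer is the maximum BID-run length (default 0).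
import Mathlib
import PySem

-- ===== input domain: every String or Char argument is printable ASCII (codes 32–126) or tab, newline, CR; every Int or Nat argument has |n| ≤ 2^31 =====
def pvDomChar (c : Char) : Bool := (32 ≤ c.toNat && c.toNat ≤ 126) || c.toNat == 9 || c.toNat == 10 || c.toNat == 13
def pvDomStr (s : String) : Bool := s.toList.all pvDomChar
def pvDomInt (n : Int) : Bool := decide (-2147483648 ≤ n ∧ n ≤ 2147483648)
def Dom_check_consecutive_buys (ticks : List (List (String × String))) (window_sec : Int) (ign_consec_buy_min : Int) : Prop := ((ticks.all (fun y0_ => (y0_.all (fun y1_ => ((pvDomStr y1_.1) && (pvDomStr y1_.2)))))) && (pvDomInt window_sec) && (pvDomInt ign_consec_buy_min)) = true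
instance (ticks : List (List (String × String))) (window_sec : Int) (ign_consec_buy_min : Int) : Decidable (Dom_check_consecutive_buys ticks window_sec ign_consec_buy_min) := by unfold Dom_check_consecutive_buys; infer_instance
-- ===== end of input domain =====

-- B replaces A's running max/current counters by an explicit run-grouping pass
-- over the materialised BID flags (alternative decomposition, same cost).


-- ===== PORT A =====
-- A: single fold carrying (max_streak, current_streak).
def check_consecutive_buys (ticks : List (List (String × String))) (window_sec : Int) (ign_consec_buy_min : Int) : Bool × Int :=
  if ticks.isEmpty || ticks.length < 3 then (false, 0)
  else
    let st := ticks.foldl (fun (s : Int × Int) t =>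
      let ask_bid := PySem.Str.upper ((PySem.Dict.ofList t).getD "ask_bid" "")
      if ask_bid == "BID" then (max s.1 (s.2 + 1), s.2 + 1)
      else (s.1, 0)) (0, 0)
    (decide (st.1 ≥ ign_consec_buy_min), st.1)

-- ===== PORT B =====
-- B helper: the two-pointer run scan of Source B — the inner `while bids[j] == bids[i]`
-- is the takeWhile, the jump `i = j` the dropWhile; run length = 1 + takeWhile length.
def pvRuns : List Bool → List Int
  | [] => []
  | b :: rest =>
    if b then ((rest.takeWhile (· == b)).length + 1 : Int) :: pvRuns (rest.dropWhile (· == b))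
    else pvRuns (rest.dropWhile (· == b))
termination_by l => l.length
decreasing_by
  all_goals exact Nat.lt_succ_of_le (List.length_dropWhile_le _ _)

def check_consecutive_buys_alt (ticks : List (List (String × String))) (window_sec : Int) (ign_consec_buy_min : Int) : Bool × Int :=
  if ticks.isEmpty || ticks.length < 3 then (false, 0)
  else
    let bids := ticks.map (fun t => PySem.Str.upper ((PySem.Dict.ofList t).getD "ask_bid" "") == "BID")
    let max_streak := (pvRuns bids).foldl max 0
    (decide (max_streak ≥ ign_consec_buy_min), max_streak)

-- ===== PRECONDITION & SPEC =====
def Spec_check_consecutive_buys (ticks : List (List (String × String))) (window_sec : Int) (ign_consec_buy_min : Int) (out : Bool × Int) : Prop := out = check_consecutive_buys_alt ticks window_sec ign_consec_buy_min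
instance (ticks : List (List (String × String))) (window_sec : Int) (ign_consec_buy_min : Int) (out : Bool × Int) : Decidable (Spec_check_consecutive_buys ticks window_sec ign_consec_buy_min out) := by unfold Spec_check_consecutive_buys; infer_instance

-- ===== CLAIM (what is proved, stated in full; the proofs are below) =====
def Claim_equal_check_consecutive_buys : Prop := ∀ (ticks : List (List (String × String))) (window_sec : Int) (ign_consec_buy_min : Int), Dom_check_consecutive_buys ticks window_sec ign_consec_buy_min → Spec_check_consecutive_buys ticks window_sec ign_consec_buy_min (check_consecutive_buys ticks window_sec ign_consec_buy_min)

-- ===== LEMMAS AND PROOFS =====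

-- A's fold, restated on the boolean flags.
def pvLoopA (bs : List Bool) (s : Int × Int) : Int × Int :=
  bs.foldl (fun s b => if b then (max s.1 (s.2 + 1), s.2 + 1) else (s.1, 0)) s

-- "best streak still ahead", counting a current prefix of c BIDs.
def pvF : List Bool → Int → Int
  | [], _ => 0
  | true :: bs, c => max (c + 1) (pvF bs (c + 1))
  | false :: bs, _ => pvF bs 0

lemma pvLoopA_eq_F (bs : List Bool) : ∀ m c : Int, 0 ≤ m →
    (pvLoopA bs (m, c)).1 = max m (pvF bs c) := by
  induction bs with
  | nil => intro m c hm; simp [pvLoopA, pvF]; omega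
  | cons b bs ih =>
    intro m c hm
    cases b with
    | true =>
      simp only [pvLoopA, List.foldl_cons, if_true, pvF]
      rw [show (bs.foldl _ (max m (c+1), c+1)) = pvLoopA bs (max m (c+1), c+1) from rfl]
      rw [ih (max m (c+1)) (c+1) (le_max_of_le_left hm)]
      omega
    | false =>
      simp only [pvLoopA, List.foldl_cons, pvF]
      exact ih m 0 hm

lemma pvBool_ne_of_beq_false {x b : Bool} (h : (x == b) = false) : x = !b := by
  cases x <;> cases b <;> simp_all

lemma pvF_false_prefix (j : ℕ) (tail : List Bool) :
    pvF (List.replicate j false ++ tail) 0 = pvF tail 0 := by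
  induction j with
  | zero => simp
  | succ j ih => simpa [List.replicate_succ, pvF] using ih

lemma pvF_true_run (k : ℕ) (tail : List Bool) (c : Int)
    (hk : 1 ≤ k) (htail : tail = [] ∨ tail.head? = some false) :
    pvF (List.replicate k true ++ tail) c = max (c + k) (pvF tail 0) := by
  induction k generalizing c with
  | zero => omega
  | succ k ih =>
    cases Nat.eq_zero_or_pos k with
    | inl h0 =>
      subst h0
      rcases htail with h | h
      · simp [h, pvF]
      · cases tail with
        | nil => simp at h
        | cons b t =>
          simp at h; subst h
          simp only [List.replicate_succ, List.replicate_zero, List.nil_append,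
            List.cons_append, pvF]
          push_cast
          omega
    | inr hpos =>
      rw [List.replicate_succ, List.cons_append]
      show max (c + 1) (pvF (List.replicate k true ++ tail) (c + 1)) = _
      rw [ih _ hpos]
      push_cast
      omega

lemma foldl_max_max (l : List Int) : ∀ a b : Int,
    l.foldl max (max a b) = max a (l.foldl max b) := by
  induction l with
  | nil => intro a b; simp
  | cons x l ih =>
    intro a b
    simp only [List.foldl_cons, max_assoc]
    exact ih a (max b x)

lemma dropWhile_head (p : Bool → Bool) (l : List Bool) :
    l.dropWhile p = [] ∨ ∃ b t, l.dropWhile p = b :: t ∧ p b = false := by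
  induction l with
  | nil => left; rfl
  | cons x l ih =>
    by_cases h : p x = true
    · simpa [List.dropWhile, h] using ih
    · right; exact ⟨x, l, by simp [List.dropWhile, h], by simpa using h⟩

lemma takeWhile_eq_replicate (b : Bool) (l : List Bool) :
    l.takeWhile (· == b) = List.replicate (l.takeWhile (· == b)).length b := by
  apply List.eq_replicate_of_mem
  intro x hx
  have := List.mem_takeWhile_imp hx
  simpa using this.symm

lemma pvRuns_cons (b : Bool) (rest : List Bool) :
    pvRuns (b :: rest) =
      if b then ((rest.takeWhile (· == b)).length + 1 : Int) :: pvRuns (rest.dropWhile (· == b))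
      else pvRuns (rest.dropWhile (· == b)) := by
  rw [pvRuns]

lemma pvRuns_eq_F (n : ℕ) : ∀ bs : List Bool, bs.length ≤ n →
    (pvRuns bs).foldl max 0 = max 0 (pvF bs 0) := by
  induction n with
  | zero =>
    intro bs h
    have : bs = [] := List.eq_nil_of_length_eq_zero (Nat.le_zero.mp h)
    simp [this, pvRuns, pvF]
  | succ n ih =>
    intro bs hlen
    cases bs with
    | nil => simp [pvRuns, pvF]
    | cons b rest =>
      have hsplit : rest = rest.takeWhile (· == b) ++ rest.dropWhile (· == b) :=
        (List.takeWhile_append_dropWhile).symm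
      have htail_len : (rest.dropWhile (· == b)).length ≤ n := by
        have h1 := List.length_dropWhile_le (· == b) rest
        simp only [List.length_cons] at hlen
        omega
      have htail_head : rest.dropWhile (· == b) = [] ∨
          (rest.dropWhile (· == b)).head? = some (!b) := by
        rcases dropWhile_head (· == b) rest with h | ⟨x, t, hx, hpx⟩
        · left; exact h
        · right; rw [hx, pvBool_ne_of_beq_false hpx]; rfl
      cases b with
      | true =>
        set run := rest.takeWhile (· == true) with hrun
        set tail := rest.dropWhile (· == true) with htail
        have hhead : tail = [] ∨ tail.head? = some false := by
          simpa using htail_head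
        have hbs : (true :: rest) = List.replicate (run.length + 1) true ++ tail := by
          rw [List.replicate_succ, List.cons_append]
          congr 1
          rw [hsplit]; congr 1
          rw [hrun]; exact takeWhile_eq_replicate true rest
        have hF : pvF (true :: rest) 0 = max ((run.length : Int) + 1) (pvF tail 0) := by
          rw [hbs, pvF_true_run (run.length + 1) tail 0 (by omega) hhead]
          congr 1
          push_cast
          ring
        rw [pvRuns_cons, if_pos rfl, hF]
        simp only [List.foldl_cons]
        rw [max_comm (0 : Int), foldl_max_max, ih tail htail_len, max_left_comm]
      | false =>
        have hF : pvF (false :: rest) 0 = pvF (rest.dropWhile (· == false)) 0 := by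
          show pvF rest 0 = _
          conv_lhs => rw [hsplit, takeWhile_eq_replicate false rest]
          exact pvF_false_prefix _ _
        rw [pvRuns_cons, if_neg (by simp), hF, ih _ htail_len]

lemma streak_eq (bs : List Bool) :
    (pvLoopA bs (0, 0)).1 = (pvRuns bs).foldl max 0 := by
  rw [pvLoopA_eq_F bs 0 0 le_rfl, pvRuns_eq_F bs.length bs le_rfl]

-- ===== VERDICT (by name: the statement is the Claim_ definition above) =====
theorem check_consecutive_buys_spec : Claim_equal_check_consecutive_buys := by
  intro ticks window_sec ign _
  unfold Spec_check_consecutive_buys check_consecutive_buys check_consecutive_buys_alt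
  by_cases hg : ticks.isEmpty || ticks.length < 3
  · simp [hg]
  · simp only [hg, Bool.false_eq_true, if_false]
    have hfold : ticks.foldl (fun (s : Int × Int) t =>
        let ask_bid := PySem.Str.upper ((PySem.Dict.ofList t).getD "ask_bid" "")
        if ask_bid == "BID" then (max s.1 (s.2 + 1), s.2 + 1) else (s.1, 0)) (0, 0)
        = pvLoopA (ticks.map (fun t => PySem.Str.upper ((PySem.Dict.ofList t).getD "ask_bid" "") == "BID")) (0, 0) := by
      rw [pvLoopA, List.foldl_map]
    rw [hfold, streak_eq]
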